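-- pv_equiv track=rewrite | github.com/Nahdar/Lab4A | HashTable.py | to_decimal_from26
-- ===== SOURCE A (Python) =====
-- def to_decimal_from26(alpha):
--
--     decimal = 0
--     placement = 1
--
--     for i in range(len(alpha) - 1, -1, -1):
--         if alpha[i] is 'a':
--             decimal += 0
--         elif alpha[i] == 'b':
--             decimal += 1 * placement
--         elif alpha[i] == 'c':
--             decimal += 2 * placement
--         elif alpha[i] == 'd':
--             decimal += 3 * placement
--         elif alpha[i] == 'e':
--             decimal += 4 * placement
--         elif alpha[i] == 'f':
--             decimal += 5 * placement
--         elif alpha[i] == 'g':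
--             decimal += 6 * placement
--         elif alpha[i] == 'h':
--             decimal += 7 * placement
--         elif alpha[i] == 'i':
--             decimal += 8 * placement
--         elif alpha[i] == 'j':
--             decimal += 9 * placement
--         elif alpha[i] == 'k':
--             decimal += 10 * placement
--         elif alpha[i] == 'l':
--             decimal += 11 * placement
--         elif alpha[i] == 'm':
--             decimal += 12 * placement
--         elif alpha[i] == 'n':
--             decimal += 13 * placement
--         elif alpha[i] == 'o':
--             decimal += 14 * placement
--         elif alpha[i] == 'p':
--             decimal += 15 * placement
--         elif alpha[i] == 'q':
--             decimal += 16 * placement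
--         elif alpha[i] == 'r':
--             decimal += 17 * placement
--         elif alpha[i] == 's':
--             decimal += 18 * placement
--         elif alpha[i] == 't':
--             decimal += 19 * placement
--         elif alpha[i] == 'u':
--             decimal += 20 * placement
--         elif alpha[i] == 'v':
--             decimal += 21 * placement
--         elif alpha[i] == 'w':
--             decimal += 22 * placement
--         elif alpha[i] == 'x':
--             decimal += 23 * placement
--         elif alpha[i] == 'y':
--             decimal += 24 * placement
--         elif alpha[i] == 'z':
--             decimal += 25 * placement
--         placement *= 26
--
--     return decimal
-- ===== SOURCE B (Python) =====
-- def to_decimal_from26(alpha):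
--     decimal = 0
--     for c in alpha:
--         decimal = decimal * 26 + (ord(c) - 97 if 'a' <= c <= 'z' else 0)
--     return decimal
-- ===== Notes on version B (the rewrite author's own statement) =====
-- stated objective: simpler
-- what changed: Replaces the right-to-left index loop with a 26-branch elif chain and a placement power accumulator by a forward Horner scan (decimal = decimal*26 + digit) computing each digit arithmetically from ord(c).
import Mathlib
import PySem

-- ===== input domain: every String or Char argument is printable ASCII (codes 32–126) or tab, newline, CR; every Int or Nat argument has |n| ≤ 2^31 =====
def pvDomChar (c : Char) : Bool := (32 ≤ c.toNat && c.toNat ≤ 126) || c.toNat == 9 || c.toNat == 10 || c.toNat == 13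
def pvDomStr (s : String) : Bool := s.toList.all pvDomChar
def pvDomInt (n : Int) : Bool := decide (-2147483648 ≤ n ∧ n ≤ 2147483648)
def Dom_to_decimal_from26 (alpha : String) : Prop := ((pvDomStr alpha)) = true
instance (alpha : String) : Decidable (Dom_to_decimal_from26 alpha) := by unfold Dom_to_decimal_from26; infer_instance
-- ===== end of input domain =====

-- B replaces A's right-to-left loop (26-branch elif chain + placement power) by a forward
-- Horner scan computing each digit arithmetically from ord(c); same values, simpler code.

-- ===== PORT A =====
-- A's elif chain: digit value of one character ('a' and any non-letter add 0)
def pvValA (c : Char) : Int :=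
  if c = 'a' then 0
  else if c = 'b' then 1
  else if c = 'c' then 2
  else if c = 'd' then 3
  else if c = 'e' then 4
  else if c = 'f' then 5
  else if c = 'g' then 6
  else if c = 'h' then 7
  else if c = 'i' then 8
  else if c = 'j' then 9
  else if c = 'k' then 10
  else if c = 'l' then 11
  else if c = 'm' then 12
  else if c = 'n' then 13
  else if c = 'o' then 14
  else if c = 'p' then 15
  else if c = 'q' then 16
  else if c = 'r' then 17
  else if c = 's' then 18
  else if c = 't' then 19
  else if c = 'u' then 20
  else if c = 'v' then 21
  else if c = 'w' then 22
  else if c = 'x' then 23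
  else if c = 'y' then 24
  else if c = 'z' then 25
  else 0

def to_decimal_from26 (alpha : String) : Int :=
  -- for i in range(len(alpha)-1, -1, -1): decimal += <chain>(alpha[i]) * placement; placement *= 26
  (((PySem.List.pyRange (PySem.Str.len alpha - 1) (-1) (-1)).foldl
      (fun (st : Int × Int) i =>
        (st.1 + pvValA (PySem.List.pyGetD alpha.toList i ' ') * st.2, st.2 * 26))
      (0, 1))).1

-- ===== PORT B =====
def to_decimal_from26_alt (alpha : String) : Int :=
  alpha.toList.foldl
    (fun decimal c => decimal * 26 + (if 'a' ≤ c ∧ c ≤ 'z' then (c.toNat : Int) - 97 else 0)) 0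

-- ===== PRECONDITION & SPEC =====
def Spec_to_decimal_from26 (alpha : String) (out : Int) : Prop := out = to_decimal_from26_alt alpha
instance (alpha : String) (out : Int) : Decidable (Spec_to_decimal_from26 alpha out) := by unfold Spec_to_decimal_from26; infer_instance

-- ===== CLAIM (what is proved, stated in full; the proofs are below) =====
def Claim_equal_to_decimal_from26 : Prop := ∀ (alpha : String), Dom_to_decimal_from26 alpha → Spec_to_decimal_from26 alpha (to_decimal_from26 alpha)

-- ===== LEMMAS AND PROOFS =====

-- B's per-character digit value
def pvValB (c : Char) : Int :=
  if 'a' ≤ c ∧ c ≤ 'z' then (c.toNat : Int) - 97 else 0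

-- positional (base-26) value of a character list
def pvVal26 : List Char → Int
  | [] => 0
  | c :: t => pvValB c * (26 : Int) ^ t.length + pvVal26 t

theorem pvValA_eq (c : Char) : pvValA c = pvValB c := by
  by_cases hr : 'a' ≤ c ∧ c ≤ 'z'
  · have hb : 97 ≤ c.val.toNat ∧ c.val.toNat ≤ 122 := ⟨hr.1, hr.2⟩
    have hd : c.val.toNat = 97 ∨ c.val.toNat = 98 ∨ c.val.toNat = 99 ∨ c.val.toNat = 100 ∨ c.val.toNat = 101 ∨ c.val.toNat = 102 ∨ c.val.toNat = 103 ∨ c.val.toNat = 104 ∨ c.val.toNat = 105 ∨ c.val.toNat = 106 ∨ c.val.toNat = 107 ∨ c.val.toNat = 108 ∨ c.val.toNat = 109 ∨ c.val.toNat = 110 ∨ c.val.toNat = 111 ∨ c.val.toNat = 112 ∨ c.val.toNat = 113 ∨ c.val.toNat = 114 ∨ c.val.toNat = 115 ∨ c.val.toNat = 116 ∨ c.val.toNat = 117 ∨ c.val.toNat = 118 ∨ c.val.toNat = 119 ∨ c.val.toNat = 120 ∨ c.val.toNat = 121 ∨ c.val.toNat = 122 := by omega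
    rcases hd with h|h|h|h|h|h|h|h|h|h|h|h|h|h|h|h|h|h|h|h|h|h|h|h|h|h
    · have hc : c = 'a' := Char.ext (UInt32.toNat_inj.mp (by rw [h]; rfl))
      subst hc; decide
    · have hc : c = 'b' := Char.ext (UInt32.toNat_inj.mp (by rw [h]; rfl))
      subst hc; decide
    · have hc : c = 'c' := Char.ext (UInt32.toNat_inj.mp (by rw [h]; rfl))
      subst hc; decide
    · have hc : c = 'd' := Char.ext (UInt32.toNat_inj.mp (by rw [h]; rfl))
      subst hc; decide
    · have hc : c = 'e' := Char.ext (UInt32.toNat_inj.mp (by rw [h]; rfl))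
      subst hc; decide
    · have hc : c = 'f' := Char.ext (UInt32.toNat_inj.mp (by rw [h]; rfl))
      subst hc; decide
    · have hc : c = 'g' := Char.ext (UInt32.toNat_inj.mp (by rw [h]; rfl))
      subst hc; decide
    · have hc : c = 'h' := Char.ext (UInt32.toNat_inj.mp (by rw [h]; rfl))
      subst hc; decide
    · have hc : c = 'i' := Char.ext (UInt32.toNat_inj.mp (by rw [h]; rfl))
      subst hc; decide
    · have hc : c = 'j' := Char.ext (UInt32.toNat_inj.mp (by rw [h]; rfl))
      subst hc; decide
    · have hc : c = 'k' := Char.ext (UInt32.toNat_inj.mp (by rw [h]; rfl))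
      subst hc; decide
    · have hc : c = 'l' := Char.ext (UInt32.toNat_inj.mp (by rw [h]; rfl))
      subst hc; decide
    · have hc : c = 'm' := Char.ext (UInt32.toNat_inj.mp (by rw [h]; rfl))
      subst hc; decide
    · have hc : c = 'n' := Char.ext (UInt32.toNat_inj.mp (by rw [h]; rfl))
      subst hc; decide
    · have hc : c = 'o' := Char.ext (UInt32.toNat_inj.mp (by rw [h]; rfl))
      subst hc; decide
    · have hc : c = 'p' := Char.ext (UInt32.toNat_inj.mp (by rw [h]; rfl))
      subst hc; decide
    · have hc : c = 'q' := Char.ext (UInt32.toNat_inj.mp (by rw [h]; rfl))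
      subst hc; decide
    · have hc : c = 'r' := Char.ext (UInt32.toNat_inj.mp (by rw [h]; rfl))
      subst hc; decide
    · have hc : c = 's' := Char.ext (UInt32.toNat_inj.mp (by rw [h]; rfl))
      subst hc; decide
    · have hc : c = 't' := Char.ext (UInt32.toNat_inj.mp (by rw [h]; rfl))
      subst hc; decide
    · have hc : c = 'u' := Char.ext (UInt32.toNat_inj.mp (by rw [h]; rfl))
      subst hc; decide
    · have hc : c = 'v' := Char.ext (UInt32.toNat_inj.mp (by rw [h]; rfl))
      subst hc; decide
    · have hc : c = 'w' := Char.ext (UInt32.toNat_inj.mp (by rw [h]; rfl))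
      subst hc; decide
    · have hc : c = 'x' := Char.ext (UInt32.toNat_inj.mp (by rw [h]; rfl))
      subst hc; decide
    · have hc : c = 'y' := Char.ext (UInt32.toNat_inj.mp (by rw [h]; rfl))
      subst hc; decide
    · have hc : c = 'z' := Char.ext (UInt32.toNat_inj.mp (by rw [h]; rfl))
      subst hc; decide
  · unfold pvValA pvValB
    rw [if_neg hr]
    have n0 : c ≠ 'a' := by rintro rfl; exact hr (by decide)
    have n1 : c ≠ 'b' := by rintro rfl; exact hr (by decide)
    have n2 : c ≠ 'c' := by rintro rfl; exact hr (by decide)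
    have n3 : c ≠ 'd' := by rintro rfl; exact hr (by decide)
    have n4 : c ≠ 'e' := by rintro rfl; exact hr (by decide)
    have n5 : c ≠ 'f' := by rintro rfl; exact hr (by decide)
    have n6 : c ≠ 'g' := by rintro rfl; exact hr (by decide)
    have n7 : c ≠ 'h' := by rintro rfl; exact hr (by decide)
    have n8 : c ≠ 'i' := by rintro rfl; exact hr (by decide)
    have n9 : c ≠ 'j' := by rintro rfl; exact hr (by decide)
    have n10 : c ≠ 'k' := by rintro rfl; exact hr (by decide)
    have n11 : c ≠ 'l' := by rintro rfl; exact hr (by decide)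
    have n12 : c ≠ 'm' := by rintro rfl; exact hr (by decide)
    have n13 : c ≠ 'n' := by rintro rfl; exact hr (by decide)
    have n14 : c ≠ 'o' := by rintro rfl; exact hr (by decide)
    have n15 : c ≠ 'p' := by rintro rfl; exact hr (by decide)
    have n16 : c ≠ 'q' := by rintro rfl; exact hr (by decide)
    have n17 : c ≠ 'r' := by rintro rfl; exact hr (by decide)
    have n18 : c ≠ 's' := by rintro rfl; exact hr (by decide)
    have n19 : c ≠ 't' := by rintro rfl; exact hr (by decide)
    have n20 : c ≠ 'u' := by rintro rfl; exact hr (by decide)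
    have n21 : c ≠ 'v' := by rintro rfl; exact hr (by decide)
    have n22 : c ≠ 'w' := by rintro rfl; exact hr (by decide)
    have n23 : c ≠ 'x' := by rintro rfl; exact hr (by decide)
    have n24 : c ≠ 'y' := by rintro rfl; exact hr (by decide)
    have n25 : c ≠ 'z' := by rintro rfl; exact hr (by decide)
    rw [if_neg n0, if_neg n1, if_neg n2, if_neg n3, if_neg n4, if_neg n5, if_neg n6, if_neg n7, if_neg n8, if_neg n9, if_neg n10, if_neg n11, if_neg n12, if_neg n13, if_neg n14, if_neg n15, if_neg n16, if_neg n17, if_neg n18, if_neg n19, if_neg n20, if_neg n21, if_neg n22, if_neg n23, if_neg n24, if_neg n25]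

-- A's reversed fold computes (positional value, 26^length)
theorem pvFoldrA (cs : List Char) :
    cs.foldr (fun c (st : Int × Int) => (st.1 + pvValA c * st.2, st.2 * 26)) (0, 1)
      = (pvVal26 cs, (26 : Int) ^ cs.length) := by
  induction cs with
  | nil => simp [pvVal26]
  | cons c t ih =>
    rw [List.foldr_cons, ih]
    simp only [pvVal26, pvValA_eq, List.length_cons, pow_succ, Prod.mk.injEq]
    exact ⟨by ring, trivial⟩

-- B's Horner fold with an arbitrary accumulator
theorem pvFoldlB (cs : List Char) (d : Int) :
    cs.foldl (fun decimal c => decimal * 26 + pvValB c) d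
      = d * (26 : Int) ^ cs.length + pvVal26 cs := by
  induction cs generalizing d with
  | nil => simp [pvVal26]
  | cons c t ih =>
    simp only [List.foldl_cons, ih, pvVal26, List.length_cons, pow_succ]
    ring

-- ===== VERDICT (by name: the statement is the Claim_ definition above) =====
theorem to_decimal_from26_spec : Claim_equal_to_decimal_from26 := by
  intro alpha _
  unfold Spec_to_decimal_from26 to_decimal_from26 to_decimal_from26_alt
  set cs := alpha.toList with hcs
  have hlen : PySem.Str.len alpha = (cs.length : Int) := by
    simp [PySem.Str.len, hcs]
  have hrange : PySem.List.pyRange (PySem.Str.len alpha - 1) (-1) (-1)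
      = (PySem.List.pyRange 0 (cs.length : Int) 1).reverse := by
    rw [hlen, PySem.List.pyRange_neg_one_eq_reverse]
    norm_num
  rw [hrange]
  have hmap : (PySem.List.pyRange 0 (cs.length : Int) 1).map (fun i => PySem.List.pyGetD cs i ' ') = cs :=
    PySem.List.map_pyGetD_pyRange_zero' cs ' '
  rw [← List.foldl_map (f := fun i => PySem.List.pyGetD cs i ' ')
        (g := fun (st : Int × Int) c => (st.1 + pvValA c * st.2, st.2 * 26)),
      List.map_reverse, hmap, List.foldl_reverse, pvFoldrA]
  rw [show (fun (decimal : Int) (c : Char) => decimal * 26 + if 'a' ≤ c ∧ c ≤ 'z' then (c.toNat : Int) - 97 else 0)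
        = (fun decimal c => decimal * 26 + pvValB c) from rfl,
      pvFoldlB]
  ring
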